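-- pv_equiv track=rewrite | github.com/Usmanimaaz12/DSA | 1351-count-negative-numbers-in-a-sorted-matrix/1351-count-negative-numbers-in-a-sorted-matrix.py | search_neg
-- ===== SOURCE A (Python) =====
-- def search_neg(row, n):
--     start, end = 0, n-1
--     while start<=end:
--         mid = (start+end)//2
--         if row[mid] >= 0:
--             start = mid+1
--         else:
--             end = mid - 1
--     return n-start
-- ===== SOURCE B (Python) =====
-- def search_neg(row, n):
--     # Same binary-search decisions as the loop version, expressed as a
--     # recursive narrowing of a half-open window [lo, hi).
--     def go(lo, hi):
--         if lo >= hi: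
--             return n - lo
--         mid = (lo + hi - 1) // 2
--         if row[mid] >= 0:
--             return go(mid + 1, hi)
--         return go(lo, mid)
--     return go(0, n)
-- ===== Notes on version B (the rewrite author's own statement) =====
-- stated objective: alternative
-- what changed: The while loop mutating start/end over a closed window [start,end] is replaced by a recursive helper narrowing a half-open window [lo,hi) that returns the count directly at the base case; it probes the same indices in the same order.
-- outside the precondition, e.g. on search_neg([-1, -1], 3): A returns 3, B returns 3
import Mathlib
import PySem

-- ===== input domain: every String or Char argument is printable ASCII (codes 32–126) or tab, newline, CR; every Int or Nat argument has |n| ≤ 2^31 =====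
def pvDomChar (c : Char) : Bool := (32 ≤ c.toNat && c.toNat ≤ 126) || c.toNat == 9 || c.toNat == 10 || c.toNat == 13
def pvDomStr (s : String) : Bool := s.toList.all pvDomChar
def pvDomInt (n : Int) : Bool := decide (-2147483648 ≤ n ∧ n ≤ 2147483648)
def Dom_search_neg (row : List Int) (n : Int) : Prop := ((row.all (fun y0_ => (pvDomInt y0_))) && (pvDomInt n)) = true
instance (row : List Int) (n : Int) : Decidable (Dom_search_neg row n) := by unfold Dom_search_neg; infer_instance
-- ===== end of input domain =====

-- B replaces A's while loop over a closed window [start,end] by a recursive helper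
-- narrowing a half-open window [lo,hi) that returns the count directly at its base case
-- (objective: alternative decomposition; same probes, same cost).

-- ===== PORT A =====
-- the while loop: state (start, end); returns the final start
def search_neg_loop (row : List Int) (start end_ : Int) : Int :=
  if h : start ≤ end_ then
    let mid := PySem.Int.floordiv (start + end_) 2
    match PySem.List.pyGet? row mid with
    | some v =>
        if v ≥ 0 then search_neg_loop row (mid + 1) end_
        else search_neg_loop row start (mid - 1)
    | none => start   -- Python raises IndexError here; excluded by Pre_search_neg
  else start
termination_by (end_ - start + 1).toNat
decreasing_by
  · have := PySem.Int.floordiv_two_mid_bounds h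
    simp only [mid] at *; omega
  · have := PySem.Int.floordiv_two_mid_bounds h
    simp only [mid] at *; omega

def search_neg (row : List Int) (n : Int) : Int :=
  n - search_neg_loop row 0 (n - 1)

-- ===== PORT B =====
-- recursive narrowing of the half-open window [lo, hi)
def search_neg_go (row : List Int) (n lo hi : Int) : Int :=
  if h : lo ≥ hi then n - lo
  else
    let mid := PySem.Int.floordiv (lo + hi - 1) 2
    match PySem.List.pyGet? row mid with
    | some v =>
        if v ≥ 0 then search_neg_go row n (mid + 1) hi
        else search_neg_go row n lo mid
    | none => n - lo   -- Python raises IndexError here; excluded by Pre_search_neg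
termination_by (hi - lo).toNat
decreasing_by
  · have hb : lo ≤ hi - 1 := by omega
    have := PySem.Int.floordiv_two_mid_bounds hb
    have he : lo + (hi - 1) = lo + hi - 1 := by omega
    rw [he] at this
    simp only [mid] at *; omega
  · have hb : lo ≤ hi - 1 := by omega
    have := PySem.Int.floordiv_two_mid_bounds hb
    have he : lo + (hi - 1) = lo + hi - 1 := by omega
    rw [he] at this
    simp only [mid] at *; omega

def search_neg_alt (row : List Int) (n : Int) : Int :=
  search_neg_go row n 0 n

-- ===== PRECONDITION & SPEC =====
-- Pre_ restricts to the natural domain n ≤ len(row) (the caller passes n = len(row)).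
-- Beyond it the binary search can index past the end and raise IndexError; on some
-- such inputs (e.g. an all-negative row with n < 2*len) A happens to return n, and
-- B returns the same value there — the exclusion is only the natural-domain bound.
def Pre_search_neg (row : List Int) (n : Int) : Prop := n ≤ (row.length : Int)
instance (row : List Int) (n : Int) : Decidable (Pre_search_neg row n) := by unfold Pre_search_neg; infer_instance
def pvWitness_search_neg : List Int × Int := ([5, 2, -1, -7], 4)

def Spec_search_neg (row : List Int) (n : Int) (out : Int) : Prop := out = search_neg_alt row n
instance (row : List Int) (n : Int) (out : Int) : Decidable (Spec_search_neg row n out) := by unfold Spec_search_neg; infer_instance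

-- ===== CLAIM (what is proved, stated in full; the proofs are below) =====
def Claim_equal_search_neg : Prop := ∀ (row : List Int) (n : Int), Dom_search_neg row n → Pre_search_neg row n → Spec_search_neg row n (search_neg row n)

-- ===== LEMMAS AND PROOFS =====

-- The half-open recursion computes n minus the loop's final start, for every window.
theorem go_eq_loop (row : List Int) (n lo hi : Int) :
    search_neg_go row n lo hi = n - search_neg_loop row lo (hi - 1) := by
  fun_induction search_neg_go row n lo hi with
  | case1 lo hi h =>
      rw [search_neg_loop]
      simp only [show ¬ lo ≤ hi - 1 by omega, dite_false]
  | case2 lo hi h mid v hv hge ih =>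
      rw [search_neg_loop]
      have hle : lo ≤ hi - 1 := by omega
      have he : lo + (hi - 1) = lo + hi - 1 := by omega
      simp only [hle, dite_true, he, mid] at *
      rw [hv]; simp only [hge, if_true]; exact ih
  | case3 lo hi h mid v hv hge ih =>
      rw [search_neg_loop]
      have hle : lo ≤ hi - 1 := by omega
      have he : lo + (hi - 1) = lo + hi - 1 := by omega
      simp only [hle, dite_true, he, mid] at *
      rw [hv]; simp only [hge, if_false]
      have : mid - 1 = PySem.Int.floordiv (lo + hi - 1) 2 - 1 := rfl
      exact ih
  | case4 lo hi h mid hv =>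
      rw [search_neg_loop]
      have hle : lo ≤ hi - 1 := by omega
      have he : lo + (hi - 1) = lo + hi - 1 := by omega
      simp only [hle, dite_true, he, mid] at *
      rw [hv]

-- ===== VERDICT (by name: the statement is the Claim_ definition above) =====
theorem search_neg_spec : Claim_equal_search_neg := by
  intro row n _ _
  unfold Spec_search_neg search_neg search_neg_alt
  rw [go_eq_loop]
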